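-- pv_equiv track=rewrite | github.com/pypi-data/pypi-mirror-397 | packages/easysurfvis/easysurfvis-1.0.1-py3-none-any.whl/easysurfvis/cores/general_util.py | find_consecutive_ranges
-- ===== SOURCE A (Python) =====
-- def find_consecutive_ranges(data):
--     """
--     Find index ranges of consecutive identical values
--
--     :param data: (list)
--
--     return [(start index, stop index)]
--     """
--     if not isinstance(data, list):
--         data = list(data)
--
--     if not data:
--         return []
--
--     result = []
--     start = 0
--
--     for i in range(1, len(data)):
--         if data[i] != data[i - 1]:
--             result.append((start, i - 1))
--             start = i
--
--     result.append((start, len(data) - 1))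
--     return result
-- ===== SOURCE B (Python) =====
-- def find_consecutive_ranges(data):
--     """
--     Find index ranges of consecutive identical values
--
--     :param data: (list)
--
--     return [(start index, stop index)]
--     """
--     data = list(data)
--     if not data:
--         return []
--     n = len(data)
--     bounds = [0] + [i for i in range(1, n) if data[i] != data[i - 1]] + [n]
--     return [(a, b - 1) for a, b in zip(bounds, bounds[1:])]
-- ===== Notes on version B (the rewrite author's own statement) =====
-- stated objective: simpler
-- what changed: B is stateless and staged: it first collects the list of cut positions with a comprehension, then forms the ranges by pairing consecutive boundaries (zip of the boundary list with its shift), instead of A's stateful scan that maintains a running start, appends during the loop and needs a final trailing append.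
import Mathlib
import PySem

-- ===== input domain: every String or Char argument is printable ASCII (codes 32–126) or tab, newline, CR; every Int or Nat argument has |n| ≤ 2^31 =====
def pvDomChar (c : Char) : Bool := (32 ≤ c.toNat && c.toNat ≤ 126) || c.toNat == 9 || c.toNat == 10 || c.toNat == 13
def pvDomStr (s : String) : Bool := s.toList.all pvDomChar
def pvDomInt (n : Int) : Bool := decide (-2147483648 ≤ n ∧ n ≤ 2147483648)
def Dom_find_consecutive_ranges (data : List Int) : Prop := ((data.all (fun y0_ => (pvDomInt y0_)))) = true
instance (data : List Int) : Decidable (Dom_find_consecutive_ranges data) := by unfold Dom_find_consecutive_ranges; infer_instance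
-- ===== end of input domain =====

-- B replaces A's stateful scan (running start, append on each boundary, final trailing
-- append) by two stateless stages: a comprehension collecting the cut positions, then a
-- zip of the boundary list with its own shift to pair consecutive boundaries; simpler.


-- the comparison 'data[i] != data[i-1]' shared by both programs
def pvCut (data : List Int) (i : Int) : Bool :=
  PySem.List.pyGetD data i 0 != PySem.List.pyGetD data (i - 1) 0

-- ===== PORT A =====
-- one step of A's loop body: 'if data[i] != data[i-1]: result.append((start, i-1)); start = i'
def pvAstep (data : List Int) (st : List (Int × Int) × Int) (i : Int) : List (Int × Int) × Int :=
  if pvCut data i then (st.1 ++ [(st.2, i - 1)], i) else st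

def find_consecutive_ranges (data : List Int) : List (Int × Int) :=
  if data = [] then []
  else
    let st := (PySem.List.pyRange 1 (data.length : Int) 1).foldl (pvAstep data) ([], 0)
    st.1 ++ [(st.2, (data.length : Int) - 1)]

-- ===== PORT B =====
-- Source B: cut positions by comprehension, then pair consecutive boundaries via zip
def find_consecutive_ranges_alt (data : List Int) : List (Int × Int) :=
  if data = [] then []
  else
    let bounds : List Int :=
      0 :: ((PySem.List.pyRange 1 (data.length : Int) 1).filter (pvCut data) ++ [(data.length : Int)])
    (bounds.zip (bounds.drop 1)).map (fun p => (p.1, p.2 - 1))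

-- ===== PRECONDITION & SPEC =====
def Spec_find_consecutive_ranges (data : List Int) (out : List (Int × Int)) : Prop := out = find_consecutive_ranges_alt data
instance (data : List Int) (out : List (Int × Int)) : Decidable (Spec_find_consecutive_ranges data out) := by unfold Spec_find_consecutive_ranges; infer_instance

-- ===== CLAIM (what is proved, stated in full; the proofs are below) =====
def Claim_equal_find_consecutive_ranges : Prop := ∀ (data : List Int), Dom_find_consecutive_ranges data → Spec_find_consecutive_ranges data (find_consecutive_ranges data)

-- ===== LEMMAS AND PROOFS =====

-- A's result, characterised by the chain of cut positions: consecutive pairs and last bound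
def pvChain (s : Int) : List Int → List (Int × Int) × Int
  | [] => ([], s)
  | c :: cs => ((s, c - 1) :: (pvChain c cs).1, (pvChain c cs).2)

-- A's fold over any index list is the chain of the *filtered* (cut) indices
lemma pvFold (data : List Int) (is : List Int) (acc : List (Int × Int)) (s : Int) :
    is.foldl (pvAstep data) (acc, s) =
      (acc ++ (pvChain s (is.filter (pvCut data))).1, (pvChain s (is.filter (pvCut data))).2) := by
  induction is generalizing acc s with
  | nil => simp [pvChain]
  | cons i is ih =>
    by_cases h : pvCut data i
    · simp [pvAstep, h, ih, pvChain]
    · simp [pvAstep, h, ih]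

-- the chain of cuts (with final bound n) equals B's zip-of-boundaries form
lemma pvZip (cuts : List Int) (s n : Int) :
    (pvChain s cuts).1 ++ [((pvChain s cuts).2, n - 1)] =
      ((s :: (cuts ++ [n])).zip (cuts ++ [n])).map (fun p => (p.1, p.2 - 1)) := by
  induction cuts generalizing s with
  | nil => simp [pvChain]
  | cons c cs ih => simp [pvChain, ih c]

-- ===== VERDICT (by name: the statement is the Claim_ definition above) =====
theorem find_consecutive_ranges_spec : Claim_equal_find_consecutive_ranges := by
  intro data _
  unfold Spec_find_consecutive_ranges find_consecutive_ranges find_consecutive_ranges_alt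
  by_cases hd : data = []
  · simp [hd]
  · simp only [if_neg hd]
    rw [pvFold]
    simpa using pvZip ((PySem.List.pyRange 1 (data.length : Int) 1).filter (pvCut data)) 0 (data.length : Int)
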